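-- pv_equiv track=rewrite | github.com/chenyn273/GPTVD | gptvd/cluster_ablation_data_split.py | split_by_label
-- ===== SOURCE A (Python) =====
-- def split_by_label(samples):
--     """
--     将样本列表按照 label 字段分为两个列表。假设每个样本都有整型字段 "label"，值为 0 或 1。
--     返回一个二元组 (label0_list, label1_list)。
--     """
--     label0_list = []
--     label1_list = []
--     for item in samples:
--         lbl = item.get("label")
--         if lbl == 0:
--             label0_list.append(item)
--         elif lbl == 1:
--             label1_list.append(item)
--         else:
--             # 如果有其他取值，忽略或抛出异常，根据需求自行调整
--             continue
--     return label0_list, label1_list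
-- ===== SOURCE B (Python) =====
-- def split_by_label(samples):
--     data = list(samples)
--
--     def go(chunk):
--         n = len(chunk)
--         if n == 0:
--             return [], []
--         if n == 1:
--             item = chunk[0]
--             lbl = item.get("label")
--             if lbl == 0:
--                 return [item], []
--             if lbl == 1:
--                 return [], [item]
--             return [], []
--         mid = n // 2
--         lz, l1 = go(chunk[:mid])
--         rz, r1 = go(chunk[mid:])
--         return lz + rz, l1 + r1
--
--     return go(data)
-- ===== Notes on version B (the rewrite author's own statement) =====
-- stated objective: alternative
-- what changed: Replaces the single linear loop with shared accumulators by a divide-and-conquer recursion: the list is split in halves, each half partitioned recursively, and the halves' results concatenated (order is preserved because concatenation keeps left-half elements before right-half ones).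
import Mathlib
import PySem

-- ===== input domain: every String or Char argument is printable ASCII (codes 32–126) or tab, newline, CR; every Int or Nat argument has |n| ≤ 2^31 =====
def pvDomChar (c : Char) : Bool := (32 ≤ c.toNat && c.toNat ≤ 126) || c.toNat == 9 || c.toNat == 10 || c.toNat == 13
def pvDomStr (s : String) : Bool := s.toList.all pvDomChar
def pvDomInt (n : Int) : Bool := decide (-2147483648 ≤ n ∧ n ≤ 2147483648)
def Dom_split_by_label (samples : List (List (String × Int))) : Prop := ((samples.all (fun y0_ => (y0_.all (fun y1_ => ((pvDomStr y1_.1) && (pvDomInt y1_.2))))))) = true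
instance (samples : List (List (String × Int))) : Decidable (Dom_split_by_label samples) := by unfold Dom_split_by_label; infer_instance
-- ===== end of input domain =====

-- B partitions by divide-and-conquer (split in halves, recurse, concatenate) instead of A's single accumulator loop; objective: alternative algorithm, same results.


-- ===== PORT A =====
def split_by_label (samples : List (List (String × Int))) : (List (List (String × Int))) × (List (List (String × Int))) :=
  samples.foldl (fun (acc : List (List (String × Int)) × List (List (String × Int))) item =>
    let lbl := (PySem.Dict.mk item).get? "label"
    if lbl = some 0 then (acc.1 ++ [item], acc.2)
    else if lbl = some 1 then (acc.1, acc.2 ++ [item])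
    else acc) ([], [])

-- ===== PORT B =====
-- B's helper go: divide and conquer on the chunk (chunk[:mid] / chunk[mid:] = take/drop)
def goSplit : List (List (String × Int)) → (List (List (String × Int))) × (List (List (String × Int)))
  | [] => ([], [])
  | [item] =>
    let lbl := (PySem.Dict.mk item).get? "label"
    if lbl = some 0 then ([item], [])
    else if lbl = some 1 then ([], [item])
    else ([], [])
  | x :: y :: rest =>
    let chunk := x :: y :: rest
    let mid := chunk.length / 2
    let l := goSplit (chunk.take mid)
    let r := goSplit (chunk.drop mid)
    (l.1 ++ r.1, l.2 ++ r.2)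
termination_by chunk => chunk.length
decreasing_by
  · simp [List.length_take]; omega
  · simp; omega

def split_by_label_alt (samples : List (List (String × Int))) : (List (List (String × Int))) × (List (List (String × Int))) :=
  let data := samples
  goSplit data

-- ===== PRECONDITION & SPEC =====
def Spec_split_by_label (samples : List (List (String × Int))) (out : (List (List (String × Int))) × (List (List (String × Int)))) : Prop := out = split_by_label_alt samples
instance (samples : List (List (String × Int))) (out : (List (List (String × Int))) × (List (List (String × Int)))) : Decidable (Spec_split_by_label samples out) := by unfold Spec_split_by_label; infer_instance

-- ===== CLAIM (what is proved, stated in full; the proofs are below) =====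
def Claim_equal_split_by_label : Prop := ∀ (samples : List (List (String × Int))), Dom_split_by_label samples → Spec_split_by_label samples (split_by_label samples)

-- ===== LEMMAS AND PROOFS =====
-- A's loop, from any accumulator, appends the two filtered sublists
theorem split_by_label_foldl (samples : List (List (String × Int)))
    (l0 l1 : List (List (String × Int))) :
    samples.foldl (fun (acc : List (List (String × Int)) × List (List (String × Int))) item =>
      let lbl := (PySem.Dict.mk item).get? "label"
      if lbl = some 0 then (acc.1 ++ [item], acc.2)
      else if lbl = some 1 then (acc.1, acc.2 ++ [item])
      else acc) (l0, l1)
    = (l0 ++ samples.filter (fun item => (PySem.Dict.mk item).get? "label" == some 0),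
       l1 ++ samples.filter (fun item => (PySem.Dict.mk item).get? "label" == some 1)) := by
  induction samples generalizing l0 l1 with
  | nil => simp
  | cons x xs ih =>
    simp only [List.foldl_cons, List.filter_cons]
    by_cases h0 : (PySem.Dict.mk x).get? "label" = some 0
    · simp [h0, ih]
    · by_cases h1 : (PySem.Dict.mk x).get? "label" = some 1
      · simp [h1, ih]
      · simp [h0, h1, ih]

-- B's divide-and-conquer also computes the two filtered sublists
theorem goSplit_eq (l : List (List (String × Int))) :
    goSplit l
    = (l.filter (fun item => (PySem.Dict.mk item).get? "label" == some 0),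
       l.filter (fun item => (PySem.Dict.mk item).get? "label" == some 1)) := by
  induction l using goSplit.induct with
  | case1 => simp [goSplit]
  | case2 item lbl h =>
    have h' : (PySem.Dict.mk item).get? "label" = some 0 := h
    simp [goSplit, h']
  | case3 item lbl h0 h1 =>
    have h0' : ¬ (PySem.Dict.mk item).get? "label" = some 0 := h0
    have h1' : (PySem.Dict.mk item).get? "label" = some 1 := h1
    simp [goSplit, h1']
  | case4 item lbl h0 h1 =>
    have h0' : ¬ (PySem.Dict.mk item).get? "label" = some 0 := h0
    have h1' : ¬ (PySem.Dict.mk item).get? "label" = some 1 := h1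
    simp [goSplit, h0', h1']
  | case5 x y rest chunk mid ih1 ih2 =>
    rw [goSplit, ih1, ih2]
    refine Prod.ext ?_ ?_ <;>
      simp only [] <;> rw [← List.filter_append, List.take_append_drop]

-- ===== VERDICT (by name: the statement is the Claim_ definition above) =====
theorem split_by_label_spec : Claim_equal_split_by_label := by
  intro samples _
  unfold Spec_split_by_label split_by_label split_by_label_alt
  rw [goSplit_eq]
  simpa using split_by_label_foldl samples [] []
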